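-- pv_equiv track=rewrite | github.com/merore/csclass | cs61a/cats/cats.py | time_per_word
-- ===== SOURCE A (Python) =====
-- def time_per_word(words, timestamps_per_player):
--     """Return two values: the list of words that the players are typing and
--     a list of lists that stores the durations it took each player to type each word.
--
--     Arguments:
--         words: a list of words, in the order they are typed.
--         TIMESTAMPS_PER_PLAYER: A list of lists of timestamps including the time
--                           the player started typing, followed by the time
--                           the player finished typing each word.
--
--
--     >>> p = [[75, 81, 84, 90, 92], [19, 29, 35, 36, 38]]
--     >>> words, times = time_per_word(['collar', 'plush', 'blush', 'repute'], p)
--     >>> words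
--     ['collar', 'plush', 'blush', 'repute']
--     >>> times
--     [[6, 3, 6, 2], [10, 6, 1, 2]]
--     """
--     # BEGIN PROBLEM 9
--     "*** YOUR CODE HERE ***"
--     def fn(ts):
--             if len(ts) <= 1:
--                 return []
--             return [ts[1] - ts[0]] + fn(ts[1:])
--     times = []
--     for ts in timestamps_per_player:
--             times += [fn(ts)]
--     return words, times
-- ===== SOURCE B (Python) =====
-- def time_per_word(words, timestamps_per_player):
--     times = []
--     for ts in timestamps_per_player:
--         diffs = []
--         for i in range(1, len(ts)):
--             diffs.append(ts[i] - ts[i - 1])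
--         times.append(diffs)
--     return words, times
-- ===== Notes on version B (the rewrite author's own statement) =====
-- stated objective: faster
-- what changed: The recursive helper fn (which rebuilds a fresh slice ts[1:] at every recursive step) is replaced by a plain index loop appending ts[i]-ts[i-1] for i in range(1, len(ts)).
import Mathlib
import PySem

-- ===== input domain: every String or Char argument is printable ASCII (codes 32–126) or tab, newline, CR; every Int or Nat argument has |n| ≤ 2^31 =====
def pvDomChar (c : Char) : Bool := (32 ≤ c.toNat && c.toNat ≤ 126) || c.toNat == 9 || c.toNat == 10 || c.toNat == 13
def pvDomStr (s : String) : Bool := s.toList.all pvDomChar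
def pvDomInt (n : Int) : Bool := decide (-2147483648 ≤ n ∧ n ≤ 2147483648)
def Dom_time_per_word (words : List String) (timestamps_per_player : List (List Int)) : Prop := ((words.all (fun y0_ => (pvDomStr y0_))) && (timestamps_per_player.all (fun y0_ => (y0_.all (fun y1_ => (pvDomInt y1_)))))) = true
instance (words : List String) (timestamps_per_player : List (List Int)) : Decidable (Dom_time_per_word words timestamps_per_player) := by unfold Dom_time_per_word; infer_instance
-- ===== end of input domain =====

-- B replaces A's recursive helper (which re-slices ts[1:] each step, quadratic per player) with a plain linear index loop; objective: faster.


-- ===== PORT A =====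
-- A's helper fn: if len(ts) <= 1: [] else [ts[1]-ts[0]] + fn(ts[1:]); ts[1:] is the tail.
def tpwFnA : List Int → List Int
  | [] => []
  | [_] => []
  | a :: b :: rest => [b - a] ++ tpwFnA (b :: rest)

def time_per_word (words : List String) (timestamps_per_player : List (List Int)) : List String × List (List Int) :=
  (words, timestamps_per_player.foldl (fun times ts => times ++ [tpwFnA ts]) [])

-- ===== PORT B =====
-- B's inner loop: for i in range(1, len(ts)): diffs.append(ts[i] - ts[i-1]).
-- pyGetD with default 0 is exact here: every index i and i-1 visited is in range.
def tpwDiffsB (ts : List Int) : List Int :=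
  (PySem.List.pyRange 1 (PySem.List.len ts) 1).foldl
    (fun diffs i => diffs ++ [PySem.List.pyGetD ts i 0 - PySem.List.pyGetD ts (i - 1) 0]) []

def time_per_word_alt (words : List String) (timestamps_per_player : List (List Int)) : List String × List (List Int) :=
  (words, timestamps_per_player.foldl (fun times ts => times ++ [tpwDiffsB ts]) [])

-- ===== PRECONDITION & SPEC =====
def Spec_time_per_word (words : List String) (timestamps_per_player : List (List Int)) (out : List String × List (List Int)) : Prop := out = time_per_word_alt words timestamps_per_player
instance (words : List String) (timestamps_per_player : List (List Int)) (out : List String × List (List Int)) : Decidable (Spec_time_per_word words timestamps_per_player out) := by unfold Spec_time_per_word; infer_instance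

-- ===== CLAIM (what is proved, stated in full; the proofs are below) =====
def Claim_equal_time_per_word : Prop := ∀ (words : List String) (timestamps_per_player : List (List Int)), Dom_time_per_word words timestamps_per_player → Spec_time_per_word words timestamps_per_player (time_per_word words timestamps_per_player)

-- ===== LEMMAS AND PROOFS =====

-- B's loop in map form, over natural indices.
theorem tpwDiffsB_eq_map (ts : List Int) :
    tpwDiffsB ts = (List.range (ts.length - 1)).map (fun k => ts.getD (k + 1) 0 - ts.getD k 0) := by
  unfold tpwDiffsB
  rw [PySem.List.foldl_append_singleton_eq_map]
  rw [PySem.List.pyRange_one]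
  simp only [PySem.List.len_eq, List.map_map, List.nil_append]
  rw [show ((ts.length : Int) - 1).toNat = ts.length - 1 by omega]
  apply List.map_congr_left
  intro k hk
  simp only [Function.comp_apply]
  have h1 : (1 : Int) + (k : Int) = ((k + 1 : Nat) : Int) := by push_cast; ring
  rw [h1, PySem.List.pyGetD_natCast]
  rw [show ((k + 1 : Nat) : Int) - 1 = ((k : Nat) : Int) by push_cast; ring, PySem.List.pyGetD_natCast]

-- A's recursion computes the same consecutive differences.
theorem tpwFnA_eq (ts : List Int) :
    tpwFnA ts = (List.range (ts.length - 1)).map (fun k => ts.getD (k + 1) 0 - ts.getD k 0) := by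
  induction ts with
  | nil => simp [tpwFnA]
  | cons a t ih =>
    cases t with
    | nil => simp [tpwFnA]
    | cons b rest =>
      simp only [tpwFnA, List.length_cons, Nat.add_sub_cancel]
      rw [List.range_succ_eq_map, List.map_cons, List.map_map]
      simp only [List.getD_cons_succ, List.getD_cons_zero, List.singleton_append]
      congr 1

theorem tpwDiffsB_eq_fnA (ts : List Int) : tpwDiffsB ts = tpwFnA ts := by
  rw [tpwDiffsB_eq_map, tpwFnA_eq]

-- ===== VERDICT (by name: the statement is the Claim_ definition above) =====
theorem time_per_word_spec : Claim_equal_time_per_word := by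
  intro words tpp _
  unfold Spec_time_per_word time_per_word time_per_word_alt
  simp only [tpwDiffsB_eq_fnA]
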